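-- pv_equiv track=rewrite | github.com/pawel002/concurrent-algo | lab02/primes.py | _sieve_with_pi
-- ===== SOURCE A (Python) =====
-- from math import isqrt
--
-- def _sieve_with_pi(limit: int):
--     """Simple sieve up to 'limit' returning (primes, pi_table)."""
--     if limit < 2:
--         return [], [0] * (limit + 1)
--     is_prime = bytearray(b"\x01") * (limit + 1)
--     is_prime[0:2] = b"\x00\x00"
--     r = isqrt(limit)
--     for p in range(2, r + 1):
--         if is_prime[p]:
--             step = p
--             start = p * p
--             is_prime[start:limit + 1:step] = b"\x00" * ((limit - start) // step + 1)
--     primes = [i for i in range(2, limit + 1) if is_prime[i]]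
--     pi = [0] * (limit + 1)
--     cnt = 0
--     for i in range(limit + 1):
--         if i >= 2 and is_prime[i]:
--             cnt += 1
--         pi[i] = cnt
--     return primes, pi
-- ===== SOURCE B (Python) =====
-- def _sieve_with_pi(limit: int):
--     """Linear (Euler) sieve: one pass 2..limit; each composite is marked exactly
--     once, by its smallest prime factor; primes and the pi prefix table are built
--     in the same pass."""
--     if limit < 2:
--         return [], [0] * (limit + 1)
--     comp = bytearray(limit + 1)
--     primes = []
--     pi = [0, 0]
--     cnt = 0
--     for i in range(2, limit + 1):
--         if not comp[i]:
--             primes.append(i)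
--             cnt += 1
--         for p in primes:
--             if i * p > limit:
--                 break
--             comp[i * p] = 1
--             if i % p == 0:
--                 break
--         pi.append(cnt)
--     return primes, pi
-- ===== Notes on version B (the rewrite author's own statement) =====
-- stated objective: alternative
-- what changed: Replaces the Eratosthenes slice-marking sieve plus two separate output passes (primes comprehension, pi loop) with a linear Euler sieve: one combined pass over 2..limit that marks each composite exactly once via its smallest prime factor and builds the primes list and the pi prefix table as it goes.
import Mathlib
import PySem

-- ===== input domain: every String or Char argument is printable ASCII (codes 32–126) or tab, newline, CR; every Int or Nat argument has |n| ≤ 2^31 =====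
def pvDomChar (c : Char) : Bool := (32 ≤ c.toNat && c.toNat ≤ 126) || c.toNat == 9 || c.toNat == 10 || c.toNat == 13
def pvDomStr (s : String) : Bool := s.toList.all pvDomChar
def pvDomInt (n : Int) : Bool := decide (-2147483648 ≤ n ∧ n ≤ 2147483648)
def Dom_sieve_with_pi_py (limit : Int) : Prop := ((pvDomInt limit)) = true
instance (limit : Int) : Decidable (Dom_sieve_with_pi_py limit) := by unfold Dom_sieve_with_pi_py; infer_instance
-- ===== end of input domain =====

-- B replaces the Eratosthenes slice-marking sieve by one combined pass with per-number
-- trial division (objective: alternative algorithm, not claimed faster).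

-- shared trivial helper: a bytearray read b[i] (used by both ports; every read is in range)
def pvArrRead (a : Array Bool) : Nat → Bool := fun i => a.getD i false

-- ===== PORT A =====

-- the slice assignment is_prime[start:limit+1:step] = b"\x00"*cnt, setting each index in turn
def pvSetFalse (a : Array Bool) (ixs : List Nat) : Array Bool :=
  ixs.foldl (fun a m => a.setIfInBounds m false) a

-- the marking loop 'for p in range(2, r + 1)' over the bytearray
def pvMarkLoop (L : Nat) (a0 : Array Bool) : Array Bool :=
  (List.range' 2 (Nat.sqrt L + 1 - 2)).foldl
    (fun a p => if pvArrRead a p then pvSetFalse a (List.range' (p * p) ((L - p * p) / p + 1) p) else a) a0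

def sieve_with_pi_py (limit : Int) : List Int × List Int :=
  if limit < 2 then ([], List.replicate (limit + 1).toNat 0)
  else
    let L := limit.toNat
    let isp : Nat → Bool := pvArrRead (pvMarkLoop L
      (((Array.replicate (L + 1) true).setIfInBounds 0 false).setIfInBounds 1 false))
    let primes : List Int := ((List.range' 2 (L + 1 - 2)).filter (fun i => isp i)).map (fun i => (i : Int))
    let pc := (List.range (L + 1)).foldl
      (fun (acc : List Int × Int) i =>
        let cnt : Int := if 2 ≤ i ∧ isp i then acc.2 + 1 else acc.2
        (acc.1 ++ [cnt], cnt)) ([], 0)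
    (primes, pc.1)

-- ===== PORT B =====

-- the inner 'for p in primes: ...' loop with its two breaks
def pvEulerInner (limit i : Nat) : List Nat → Array Bool → Array Bool
  | [], comp => comp
  | p :: ps, comp =>
    if limit < i * p then comp
    else if i % p == 0 then comp.setIfInBounds (i * p) true
    else pvEulerInner limit i ps (comp.setIfInBounds (i * p) true)

def sieve_with_pi_py_alt (limit : Int) : List Int × List Int :=
  if limit < 2 then ([], List.replicate (limit + 1).toNat 0)
  else
    let L := limit.toNat
    let st := (List.range' 2 (L + 1 - 2)).foldl
      (fun (st : Array Bool × List Nat × List Int × Int) i =>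
        let primes := if pvArrRead st.1 i then st.2.1 else st.2.1 ++ [i]
        let cnt := if pvArrRead st.1 i then st.2.2.2 else st.2.2.2 + 1
        (pvEulerInner L i primes st.1, primes, st.2.2.1 ++ [cnt], cnt))
      (Array.replicate (L + 1) false, [], [0, 0], 0)
    (st.2.1.map (fun p => (p : Int)), st.2.2.1)

-- ===== PRECONDITION & SPEC =====
def Spec_sieve_with_pi_py (limit : Int) (out : List Int × List Int) : Prop := out = sieve_with_pi_py_alt limit
instance (limit : Int) (out : List Int × List Int) : Decidable (Spec_sieve_with_pi_py limit out) := by unfold Spec_sieve_with_pi_py; infer_instance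

-- ===== CLAIM (what is proved, stated in full; the proofs are below) =====
def Claim_equal_sieve_with_pi_py : Prop := ∀ (limit : Int), Dom_sieve_with_pi_py limit → Spec_sieve_with_pi_py limit (sieve_with_pi_py limit)

-- ===== LEMMAS AND PROOFS =====

theorem pv_read_set (a : Array Bool) (x j : Nat) :
    pvArrRead (a.setIfInBounds x false) j = if j = x then false else pvArrRead a j := by
  simp only [pvArrRead, Array.getD_eq_getD_getElem?, Array.getElem?_setIfInBounds]
  by_cases h : j = x
  · subst h
    rcases Nat.lt_or_ge j a.size with hlt | hge
    · simp [hlt]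
    · simp only [if_neg (by omega : ¬ j < a.size)]
      rw [Array.getElem?_eq_none (by omega)]
      simp
  · rw [if_neg (fun hxj : x = j => h hxj.symm), if_neg h]

theorem pvSetFalse_eq (ixs : List Nat) : ∀ (a : Array Bool) (j : Nat),
    pvArrRead (pvSetFalse a ixs) j = if j ∈ ixs then false else pvArrRead a j := by
  induction ixs with
  | nil => intro a j; simp [pvSetFalse]
  | cons x xs ih =>
      intro a j
      simp only [pvSetFalse, List.foldl_cons] at *
      rw [ih]
      by_cases hj : j ∈ xs
      · simp [hj]
      · rw [if_neg hj, pv_read_set]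
        by_cases hjx : j = x <;> simp [hjx, hj]

-- indices touched by the slice assignment for prime p are exactly the multiples of p in [p*p, L]
theorem pv_mem_marks {L p : Nat} (h2 : 2 ≤ p) (hp : p ≤ Nat.sqrt L) (j : Nat) :
    j ∈ List.range' (p * p) ((L - p * p) / p + 1) p ↔ (p ∣ j ∧ p * p ≤ j ∧ j ≤ L) := by
  have hpp : p * p ≤ L := le_trans (Nat.mul_le_mul hp hp) (Nat.sqrt_le L)
  have hp0 : 0 < p := by omega
  rw [List.mem_range']
  constructor
  · rintro ⟨i, hi, rfl⟩
    refine ⟨⟨p + i, by ring⟩, Nat.le_add_right _ _, ?_⟩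
    have h1 : i ≤ (L - p * p) / p := by omega
    have h2' : p * i ≤ p * ((L - p * p) / p) := Nat.mul_le_mul_left p h1
    have h3 : p * ((L - p * p) / p) ≤ L - p * p := by
      have := Nat.div_mul_le_self (L - p * p) p
      calc p * ((L - p * p) / p) = (L - p * p) / p * p := by ring
        _ ≤ L - p * p := this
    omega
  · rintro ⟨⟨k, rfl⟩, hpk, hkL⟩
    have hk : p ≤ k := by
      by_contra h
      have h1 : p * k + p ≤ p * p := by
        calc p * k + p = p * (k + 1) := by ring
          _ ≤ p * p := Nat.mul_le_mul_left p (by omega)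
      omega
    refine ⟨k - p, ?_, ?_⟩
    · have hms : p * (k - p) = p * k - p * p := by rw [Nat.mul_sub]
      have h1 : (k - p) * p ≤ L - p * p := by
        have hc : (k - p) * p = p * (k - p) := Nat.mul_comm _ _
        omega
      have := (Nat.le_div_iff_mul_le hp0).2 h1
      omega
    · have : p * (k - p) = p * k - p * p := by rw [Nat.mul_sub]
      omega

-- invariant of the marking loop: after processing 2..(m+1), entry i is alive iff
-- no prime ≤ m+1 marks it
theorem pv_markLoop_inv (L : Nat) :
    ∀ m, m + 1 ≤ Nat.sqrt L → ∀ i,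
    (pvArrRead ((List.range' 2 m).foldl
        (fun a p => if pvArrRead a p then pvSetFalse a (List.range' (p * p) ((L - p * p) / p + 1) p) else a)
        (((Array.replicate (L + 1) true).setIfInBounds 0 false).setIfInBounds 1 false)) i = true
      ↔ (2 ≤ i ∧ i ≤ L ∧ ∀ d, d ≤ m + 1 → Nat.Prime d → ¬(d ∣ i ∧ d * d ≤ i))) := by
  intro m
  induction m with
  | zero =>
      intro _ i
      simp only [List.range'_zero, List.foldl_nil]
      rw [pv_read_set, pv_read_set]
      have hrep : pvArrRead (Array.replicate (L + 1) true) i = decide (i < L + 1) := by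
        simp only [pvArrRead, Array.getD_eq_getD_getElem?, Array.getElem?_replicate]
        by_cases h : i < L + 1 <;> simp [h]
      by_cases h1 : i = 1
      · subst h1; simp
      · rw [if_neg h1]
        by_cases h0 : i = 0
        · subst h0; simp
        · rw [if_neg h0, hrep]
          constructor
          · intro h
            have hlt := of_decide_eq_true h
            exact ⟨by omega, by omega, fun d hd hdp => absurd hdp.two_le (by omega)⟩
          · rintro ⟨h2, hle, -⟩
            exact decide_eq_true (by omega)
  | succ m ih =>
      intro hm i
      have hm' : m + 1 ≤ Nat.sqrt L := by omega
      have hrange : List.range' 2 (m + 1) = List.range' 2 m ++ [2 + m] := by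
        have := List.range'_concat (step := 1) (s := 2) (n := m)
        simpa using this
      rw [hrange, List.foldl_append, List.foldl_cons, List.foldl_nil]
      set a := (List.range' 2 m).foldl
        (fun a p => if pvArrRead a p then pvSetFalse a (List.range' (p * p) ((L - p * p) / p + 1) p) else a)
        (((Array.replicate (L + 1) true).setIfInBounds 0 false).setIfInBounds 1 false) with ha
      have hIH := ih hm'
      set p := 2 + m with hpdef
      have hpL : p ≤ L := le_trans (by omega) (Nat.sqrt_le_self L)
      have hap : pvArrRead a p = true ↔ Nat.Prime p := by
        rw [hIH p]
        constructor
        · rintro ⟨h2, -, hno⟩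
          by_contra hnp
          have hd := Nat.minFac_prime (by omega : p ≠ 1)
          have hdd : p.minFac * p.minFac ≤ p := by
            have := Nat.minFac_sq_le_self (by omega : 0 < p) hnp
            simpa [pow_two] using this
          have hd2 : 2 ≤ p.minFac := hd.two_le
          have hdle : p.minFac ≤ m + 1 := by nlinarith
          exact hno p.minFac hdle hd ⟨Nat.minFac_dvd p, hdd⟩
        · intro hp
          refine ⟨hp.two_le, hpL, ?_⟩
          rintro d hd hdp ⟨hdvd, hdd⟩
          rcases hp.eq_one_or_self_of_dvd d hdvd with h1 | h1
          · exact absurd hdp.two_le (by omega)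
          · omega
      by_cases hp : Nat.Prime p
      · rw [if_pos (hap.2 hp)]
        rw [pvSetFalse_eq]
        by_cases hmem : i ∈ List.range' (p * p) ((L - p * p) / p + 1) p
        · rw [if_pos hmem]
          have hcond := (pv_mem_marks hp.two_le (by omega) i).1 hmem
          simp only [Bool.false_eq_true, false_iff]
          rintro ⟨-, -, hno⟩
          exact hno p (by omega) hp ⟨hcond.1, by nlinarith [hcond.2.1]⟩
        · rw [if_neg hmem]
          rw [hIH i]
          have hncond : ¬(p ∣ i ∧ p * p ≤ i ∧ i ≤ L) := fun hc =>
            hmem ((pv_mem_marks hp.two_le (by omega) i).2 hc)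
          constructor
          · rintro ⟨h2, hle, hno⟩
            refine ⟨h2, hle, ?_⟩
            intro d hd hdp hc
            rcases Nat.lt_or_ge d (m + 2) with hlt | hge
            · exact hno d (by omega) hdp hc
            · have : d = p := by omega
              subst this
              exact hncond ⟨hc.1, hc.2, hle⟩
          · rintro ⟨h2, hle, hno⟩
            exact ⟨h2, hle, fun d hd hdp hc => hno d (by omega) hdp hc⟩
      · rw [if_neg (by simpa [hap] using hp)]
        rw [hIH i]
        constructor
        · rintro ⟨h2, hle, hno⟩
          refine ⟨h2, hle, ?_⟩
          intro d hd hdp hc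
          rcases Nat.lt_or_ge d (m + 2) with hlt | hge
          · exact hno d (by omega) hdp hc
          · have : d = p := by omega
            subst d
            exact hp hdp
        · rintro ⟨h2, hle, hno⟩
          exact ⟨h2, hle, fun d hd hdp hc => hno d (by omega) hdp hc⟩

-- the finished array reads primality (within [0, L])
theorem pv_markLoop_prime (L : Nat) (hL : 2 ≤ L) (i : Nat) (hi : i ≤ L) :
    pvArrRead (pvMarkLoop L
      (((Array.replicate (L + 1) true).setIfInBounds 0 false).setIfInBounds 1 false)) i = true
    ↔ Nat.Prime i := by
  have hs1 : 1 ≤ Nat.sqrt L := Nat.le_sqrt.2 (by omega)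
  have hm : Nat.sqrt L + 1 - 2 + 1 = Nat.sqrt L := by omega
  unfold pvMarkLoop
  rw [pv_markLoop_inv L (Nat.sqrt L + 1 - 2) (by omega) i, hm]
  constructor
  · rintro ⟨h2, -, hno⟩
    by_contra hnp
    have hd := Nat.minFac_prime (by omega : i ≠ 1)
    have hdd : i.minFac * i.minFac ≤ i := by
      have := Nat.minFac_sq_le_self (by omega : 0 < i) hnp
      simpa [pow_two] using this
    have hdle : i.minFac ≤ Nat.sqrt L := Nat.le_sqrt.2 (le_trans hdd hi)
    exact hno i.minFac hdle hd ⟨Nat.minFac_dvd i, hdd⟩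
  · intro hp
    refine ⟨hp.two_le, hi, ?_⟩
    rintro d hd hdp ⟨hdvd, hdd⟩
    rcases hp.eq_one_or_self_of_dvd d hdvd with h1 | h1
    · exact absurd hdp.two_le (by omega)
    · subst h1
      nlinarith [hp.two_le]

-- peeling the first two (never-prime) indices off A's pi fold
theorem pv_fold01 (g : Nat → Bool) (xs : List Nat) :
    List.foldl (fun (acc : List Int × Int) i =>
        (acc.1 ++ [if 2 ≤ i ∧ g i then acc.2 + 1 else acc.2],
         if 2 ≤ i ∧ g i then acc.2 + 1 else acc.2)) ([], 0) (0 :: 1 :: xs)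
    = List.foldl (fun (acc : List Int × Int) i =>
        (acc.1 ++ [if 2 ≤ i ∧ g i then acc.2 + 1 else acc.2],
         if 2 ≤ i ∧ g i then acc.2 + 1 else acc.2)) ([0, 0], 0) xs := by
  simp only [List.foldl_cons]
  norm_num

-- A's pi fold only depends on the predicate's values on the traversed indices
theorem pv_foldA_congr (g g' : Nat → Bool) :
    ∀ (xs : List Nat) (st : List Int × Int), (∀ i ∈ xs, g i = g' i) →
    xs.foldl (fun (acc : List Int × Int) i =>
        (acc.1 ++ [if 2 ≤ i ∧ g i then acc.2 + 1 else acc.2],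
         if 2 ≤ i ∧ g i then acc.2 + 1 else acc.2)) st
    = xs.foldl (fun (acc : List Int × Int) i =>
        (acc.1 ++ [if 2 ≤ i ∧ g' i then acc.2 + 1 else acc.2],
         if 2 ≤ i ∧ g' i then acc.2 + 1 else acc.2)) st := by
  intro xs
  induction xs with
  | nil => intro st _; rfl
  | cons x xs ih =>
      intro st hx
      simp only [List.foldl_cons]
      rw [hx x (List.mem_cons_self ..)]
      exact ih _ (fun i hi => hx i (List.mem_cons_of_mem _ hi))

-- proof-side predicate: Python's primality as a Bool
def pvPrimeB (n : Nat) : Bool := decide (Nat.Prime n)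

-- the indices marked while the Euler loop has processed outer values 2..k
def pvMarked (k L m : Nat) : Prop :=
  ∃ i, 2 ≤ i ∧ i ≤ k ∧ ∃ p, Nat.Prime p ∧ p ≤ Nat.minFac i ∧ i * p = m ∧ m ≤ L

-- the prefix of the primes list the inner loop actually marks (mirrors pvEulerInner)
def pvTaken (limit i : Nat) : List Nat → List Nat
  | [] => []
  | p :: ps => if limit < i * p then [] else if i % p == 0 then [p] else p :: pvTaken limit i ps

theorem pv_read_setTrue (a : Array Bool) (x j : Nat) :
    pvArrRead (a.setIfInBounds x true) j
      = if j = x ∧ j < a.size then true else pvArrRead a j := by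
  simp only [pvArrRead, Array.getD_eq_getD_getElem?, Array.getElem?_setIfInBounds]
  by_cases h : j = x
  · subst h
    rcases Nat.lt_or_ge j a.size with hlt | hge
    · simp [hlt]
    · simp only [if_neg (by omega : ¬ j < a.size)]
      rw [Array.getElem?_eq_none (by omega)]
      simp
      omega
  · rw [if_neg (fun hxj : x = j => h hxj.symm), if_neg (by tauto)]

theorem pv_inner_size (limit i : Nat) : ∀ (ps : List Nat) (comp : Array Bool),
    (pvEulerInner limit i ps comp).size = comp.size := by
  intro ps
  induction ps with
  | nil => intro comp; rfl
  | cons p ps ih =>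
      intro comp
      unfold pvEulerInner
      split_ifs
      · rfl
      · exact Array.size_setIfInBounds
      · rw [ih]; exact Array.size_setIfInBounds

theorem pv_inner_read (limit i : Nat) : ∀ (ps : List Nat) (comp : Array Bool),
    comp.size = limit + 1 → ∀ m,
    pvArrRead (pvEulerInner limit i ps comp) m
      = (pvArrRead comp m || decide (m ∈ (pvTaken limit i ps).map (i * ·))) := by
  intro ps
  induction ps with
  | nil => intro comp _ m; simp [pvEulerInner, pvTaken]
  | cons p ps ih =>
      intro comp hsz m
      unfold pvEulerInner pvTaken
      by_cases h1 : limit < i * p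
      · rw [if_pos h1, if_pos h1]; simp
      · rw [if_neg h1, if_neg h1]
        have hsz' : (comp.setIfInBounds (i * p) true).size = limit + 1 := by
          rw [Array.size_setIfInBounds, hsz]
        have hrd : pvArrRead (comp.setIfInBounds (i * p) true) m
            = (pvArrRead comp m || decide (m = i * p)) := by
          rw [pv_read_setTrue]
          by_cases hm : m = i * p
          · rw [if_pos ⟨hm, by omega⟩]; simp [hm]
          · rw [if_neg (fun hc => hm hc.1)]; simp [hm]
        by_cases h2 : i % p == 0
        · rw [if_pos h2, if_pos h2, hrd]
          simp
        · rw [if_neg h2, if_neg h2, ih _ hsz', hrd]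
          simp only [List.map_cons, List.mem_cons]
          by_cases hm : m = i * p <;> simp [hm, Bool.or_comm]

theorem pv_mem_taken (limit i : Nat) : ∀ (ps : List Nat), List.Pairwise (· < ·) ps →
    ∀ p, (p ∈ pvTaken limit i ps
      ↔ (p ∈ ps ∧ i * p ≤ limit ∧ ∀ q ∈ ps, q < p → ¬ (i % q = 0))) := by
  intro ps
  induction ps with
  | nil => intro _ p; simp [pvTaken]
  | cons a ps ih =>
      intro hpw p
      have ha : ∀ x ∈ ps, a < x := (List.pairwise_cons.1 hpw).1
      have hps := (List.pairwise_cons.1 hpw).2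
      unfold pvTaken
      by_cases h1 : limit < i * a
      · rw [if_pos h1]
        simp only [List.not_mem_nil, false_iff]
        rintro ⟨hmem, hle, -⟩
        rcases List.mem_cons.1 hmem with rfl | hmem'
        · omega
        · have : i * a ≤ i * p := Nat.mul_le_mul_left i (le_of_lt (ha p hmem'))
          omega
      · rw [if_neg h1]
        by_cases h2 : i % a == 0
        · rw [if_pos h2]
          have h2' : i % a = 0 := by simpa using h2
          constructor
          · intro hmem
            have hpa : p = a := by simpa using hmem
            subst hpa
            refine ⟨List.mem_cons_self .., by omega, ?_⟩
            intro q hq hlt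
            rcases List.mem_cons.1 hq with rfl | hq'
            · omega
            · exact absurd hlt (by have := ha q hq'; omega)
          · rintro ⟨hmem, hle, hall⟩
            rcases List.mem_cons.1 hmem with rfl | hmem'
            · simp
            · exact absurd h2' (hall a (List.mem_cons_self ..) (ha p hmem'))
        · rw [if_neg h2]
          have h2' : ¬ i % a = 0 := by simpa using h2
          constructor
          · intro hmem
            rcases List.mem_cons.1 hmem with rfl | hmem'
            · refine ⟨List.mem_cons_self .., by omega, ?_⟩
              intro q hq hlt
              rcases List.mem_cons.1 hq with rfl | hq'
              · omega
              · exact absurd hlt (by have := ha q hq'; omega)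
            · obtain ⟨hm1, hm2, hm3⟩ := (ih hps p).1 hmem'
              exact ⟨List.mem_cons_of_mem _ hm1, hm2, by
                intro q hq hlt
                rcases List.mem_cons.1 hq with rfl | hq'
                · exact h2'
                · exact hm3 q hq' hlt⟩
          · rintro ⟨hmem, hle, hall⟩
            rcases List.mem_cons.1 hmem with rfl | hmem'
            · exact List.mem_cons_self ..
            · exact List.mem_cons_of_mem _ ((ih hps p).2
                ⟨hmem', hle, fun q hq hlt => hall q (List.mem_cons_of_mem _ hq) hlt⟩)

theorem pv_taken_eq (limit i : Nat) (h2 : 2 ≤ i) (ps : List Nat)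
    (hps : ps = (List.range' 2 (i - 1)).filter pvPrimeB) (p : Nat) :
    p ∈ pvTaken limit i ps ↔ (Nat.Prime p ∧ p ≤ Nat.minFac i ∧ i * p ≤ limit) := by
  have hpw : List.Pairwise (· < ·) ps := by
    rw [hps]
    exact List.Pairwise.sublist List.filter_sublist (List.pairwise_lt_range' 1)
  have hmem : ∀ q, q ∈ ps ↔ (2 ≤ q ∧ q ≤ i ∧ Nat.Prime q) := by
    intro q
    rw [hps, List.mem_filter, List.mem_range']
    constructor
    · rintro ⟨⟨j, hj, rfl⟩, hq⟩
      exact ⟨by omega, by omega, by simpa [pvPrimeB] using hq⟩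
    · rintro ⟨hq2, hqi, hq⟩
      exact ⟨⟨q - 2, by omega, by omega⟩, by simpa [pvPrimeB] using hq⟩
  rw [pv_mem_taken limit i ps hpw p]
  constructor
  · rintro ⟨hmemp, hle, hall⟩
    obtain ⟨hp2, hpi, hpp⟩ := (hmem p).1 hmemp
    refine ⟨hpp, ?_, hle⟩
    by_contra hgt
    have hq := Nat.minFac_prime (by omega : i ≠ 1)
    have hqi : i.minFac ≤ i := Nat.minFac_le (by omega)
    have hqmem : i.minFac ∈ ps := (hmem i.minFac).2 ⟨hq.two_le, hqi, hq⟩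
    exact hall i.minFac hqmem (by omega) (Nat.dvd_iff_mod_eq_zero.1 (Nat.minFac_dvd i))
  · rintro ⟨hpp, hple, hle⟩
    have hpi : p ≤ i := le_trans hple (Nat.minFac_le (by omega))
    refine ⟨(hmem p).2 ⟨hpp.two_le, hpi, hpp⟩, hle, ?_⟩
    intro q hq hlt hmod
    obtain ⟨hq2, hqi, hqp⟩ := (hmem q).1 hq
    have := Nat.minFac_le_of_dvd hq2 (Nat.dvd_iff_mod_eq_zero.2 hmod)
    omega

-- processed outer value k is already marked iff it is composite
theorem pv_marked_comp (k L : Nat) (hk : 2 ≤ k) (hkL : k ≤ L) :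
    pvMarked (k - 1) L k ↔ ¬ Nat.Prime k := by
  constructor
  · rintro ⟨i, h2, hle, p, hp, hpm, heq, -⟩ hkp
    rcases hkp.eq_one_or_self_of_dvd i ⟨p, heq.symm⟩ with h1 | h1 <;> omega
  · intro hkp
    have hpf := Nat.minFac_prime (by omega : k ≠ 1)
    obtain ⟨j, hj⟩ := Nat.minFac_dvd k
    have hp2 := hpf.two_le
    have hj2 : 2 ≤ j := by
      by_contra h
      have : j = 0 ∨ j = 1 := by omega
      rcases this with rfl | rfl
      · omega
      · exact hkp (by rwa [show k.minFac = k by omega] at hpf)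
    have h2j : 2 * j ≤ k := by
      calc 2 * j ≤ k.minFac * j := Nat.mul_le_mul_right j hp2
        _ = k := hj.symm
    have hple : k.minFac ≤ j.minFac := by
      have hjdvd : j ∣ k := ⟨k.minFac, hj.trans (Nat.mul_comm k.minFac j)⟩
      have hdk : j.minFac ∣ k := dvd_trans (Nat.minFac_dvd j) hjdvd
      exact Nat.minFac_le_of_dvd (Nat.minFac_prime (by omega : j ≠ 1)).two_le hdk
    have heqk : j * k.minFac = k := (Nat.mul_comm j k.minFac).trans hj.symm
    exact ⟨j, hj2, by omega, k.minFac, hpf, hple, heqk, hkL⟩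

-- the outer-loop invariant of B: comp reads pvMarked, primes and the pi table
-- are the primes-so-far filter and the prefix-count fold
theorem pv_euler_inv (L : Nat) (hL : 2 ≤ L) :
    ∀ c, c ≤ L - 1 →
    (((List.range' 2 c).foldl
        (fun (st : Array Bool × List Nat × List Int × Int) i =>
          (pvEulerInner L i (if pvArrRead st.1 i then st.2.1 else st.2.1 ++ [i]) st.1,
           (if pvArrRead st.1 i then st.2.1 else st.2.1 ++ [i]),
           st.2.2.1 ++ [if pvArrRead st.1 i then st.2.2.2 else st.2.2.2 + 1],
           (if pvArrRead st.1 i then st.2.2.2 else st.2.2.2 + 1)))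
        (Array.replicate (L + 1) false, [], [0, 0], 0)).1.size = L + 1)
    ∧ (∀ m, pvArrRead ((List.range' 2 c).foldl
        (fun (st : Array Bool × List Nat × List Int × Int) i =>
          (pvEulerInner L i (if pvArrRead st.1 i then st.2.1 else st.2.1 ++ [i]) st.1,
           (if pvArrRead st.1 i then st.2.1 else st.2.1 ++ [i]),
           st.2.2.1 ++ [if pvArrRead st.1 i then st.2.2.2 else st.2.2.2 + 1],
           (if pvArrRead st.1 i then st.2.2.2 else st.2.2.2 + 1)))
        (Array.replicate (L + 1) false, [], [0, 0], 0)).1 m = true ↔ pvMarked (c + 1) L m)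
    ∧ ((List.range' 2 c).foldl
        (fun (st : Array Bool × List Nat × List Int × Int) i =>
          (pvEulerInner L i (if pvArrRead st.1 i then st.2.1 else st.2.1 ++ [i]) st.1,
           (if pvArrRead st.1 i then st.2.1 else st.2.1 ++ [i]),
           st.2.2.1 ++ [if pvArrRead st.1 i then st.2.2.2 else st.2.2.2 + 1],
           (if pvArrRead st.1 i then st.2.2.2 else st.2.2.2 + 1)))
        (Array.replicate (L + 1) false, [], [0, 0], 0)).2.1 = (List.range' 2 c).filter pvPrimeB
    ∧ ((List.range' 2 c).foldl
        (fun (st : Array Bool × List Nat × List Int × Int) i =>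
          (pvEulerInner L i (if pvArrRead st.1 i then st.2.1 else st.2.1 ++ [i]) st.1,
           (if pvArrRead st.1 i then st.2.1 else st.2.1 ++ [i]),
           st.2.2.1 ++ [if pvArrRead st.1 i then st.2.2.2 else st.2.2.2 + 1],
           (if pvArrRead st.1 i then st.2.2.2 else st.2.2.2 + 1)))
        (Array.replicate (L + 1) false, [], [0, 0], 0)).2.2.1
      = ((List.range' 2 c).foldl (fun (acc : List Int × Int) i =>
          (acc.1 ++ [if 2 ≤ i ∧ pvPrimeB i then acc.2 + 1 else acc.2],
           if 2 ≤ i ∧ pvPrimeB i then acc.2 + 1 else acc.2)) ([0, 0], 0)).1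
    ∧ ((List.range' 2 c).foldl
        (fun (st : Array Bool × List Nat × List Int × Int) i =>
          (pvEulerInner L i (if pvArrRead st.1 i then st.2.1 else st.2.1 ++ [i]) st.1,
           (if pvArrRead st.1 i then st.2.1 else st.2.1 ++ [i]),
           st.2.2.1 ++ [if pvArrRead st.1 i then st.2.2.2 else st.2.2.2 + 1],
           (if pvArrRead st.1 i then st.2.2.2 else st.2.2.2 + 1)))
        (Array.replicate (L + 1) false, [], [0, 0], 0)).2.2.2
      = ((List.range' 2 c).foldl (fun (acc : List Int × Int) i =>
          (acc.1 ++ [if 2 ≤ i ∧ pvPrimeB i then acc.2 + 1 else acc.2],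
           if 2 ≤ i ∧ pvPrimeB i then acc.2 + 1 else acc.2)) ([0, 0], 0)).2 := by
  intro c
  induction c with
  | zero =>
      intro _
      refine ⟨by simp, ?_, rfl, rfl, rfl⟩
      intro m
      simp only [List.range'_zero, List.foldl_nil]
      constructor
      · intro h
        exfalso
        have : pvArrRead (Array.replicate (L + 1) false) m = false := by
          simp only [pvArrRead, Array.getD_eq_getD_getElem?, Array.getElem?_replicate]
          by_cases hm : m < L + 1 <;> simp [hm]
        rw [this] at h
        exact Bool.false_ne_true h
      · rintro ⟨i, h2, h1, -⟩
        omega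
  | succ c ih =>
      intro hc
      obtain ⟨hsz, hread, hpr, hpi, hcnt⟩ := ih (by omega)
      have hiL : 2 + c ≤ L := by omega
      have hrange : List.range' 2 (c + 1) = List.range' 2 c ++ [2 + c] := by
        have := List.range'_concat (step := 1) (s := 2) (n := c)
        simpa using this
      rw [hrange]
      simp only [List.foldl_append, List.foldl_cons, List.foldl_nil]
      have hcur : pvArrRead ((List.range' 2 c).foldl
          (fun (st : Array Bool × List Nat × List Int × Int) i =>
            (pvEulerInner L i (if pvArrRead st.1 i then st.2.1 else st.2.1 ++ [i]) st.1,
             (if pvArrRead st.1 i then st.2.1 else st.2.1 ++ [i]),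
             st.2.2.1 ++ [if pvArrRead st.1 i then st.2.2.2 else st.2.2.2 + 1],
             (if pvArrRead st.1 i then st.2.2.2 else st.2.2.2 + 1)))
          (Array.replicate (L + 1) false, [], [0, 0], 0)).1 (2 + c) = true
          ↔ ¬ Nat.Prime (2 + c) := by
        rw [hread (2 + c)]
        have := pv_marked_comp (2 + c) L (by omega) hiL
        rwa [show 2 + c - 1 = c + 1 by omega] at this
      set st := (List.range' 2 c).foldl
          (fun (st : Array Bool × List Nat × List Int × Int) i =>
            (pvEulerInner L i (if pvArrRead st.1 i then st.2.1 else st.2.1 ++ [i]) st.1,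
             (if pvArrRead st.1 i then st.2.1 else st.2.1 ++ [i]),
             st.2.2.1 ++ [if pvArrRead st.1 i then st.2.2.2 else st.2.2.2 + 1],
             (if pvArrRead st.1 i then st.2.2.2 else st.2.2.2 + 1)))
          (Array.replicate (L + 1) false, [], [0, 0], 0) with hstdef
      have h22c : (2 : Nat) ≤ 2 + c := by omega
      have hplist : (if pvArrRead st.1 (2 + c) then st.2.1 else st.2.1 ++ [2 + c])
          = List.filter pvPrimeB (List.range' 2 c) ++ List.filter pvPrimeB [2 + c] := by
        rw [hpr]
        by_cases hp : Nat.Prime (2 + c)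
        · have hpb : pvPrimeB (2 + c) = true := by simp [pvPrimeB, hp]
          have hf : pvArrRead st.1 (2 + c) = false := by
            rw [Bool.eq_false_iff]
            exact fun h => (hcur.1 h) hp
          rw [hf]
          simp [hpb]
        · have hpb : pvPrimeB (2 + c) = false := by simp [pvPrimeB, hp]
          rw [hcur.2 hp]
          simp [hpb]
      have hplist' : (if pvArrRead st.1 (2 + c) then st.2.1 else st.2.1 ++ [2 + c])
          = (List.range' 2 (c + 1)).filter pvPrimeB := by
        rw [hrange, List.filter_append]
        exact hplist
      have hcntstep : (if pvArrRead st.1 (2 + c) then st.2.2.2 else st.2.2.2 + 1)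
          = (if 2 ≤ 2 + c ∧ pvPrimeB (2 + c) then
              ((List.range' 2 c).foldl (fun (acc : List Int × Int) i =>
                (acc.1 ++ [if 2 ≤ i ∧ pvPrimeB i then acc.2 + 1 else acc.2],
                 if 2 ≤ i ∧ pvPrimeB i then acc.2 + 1 else acc.2)) ([0, 0], 0)).2 + 1
              else ((List.range' 2 c).foldl (fun (acc : List Int × Int) i =>
                (acc.1 ++ [if 2 ≤ i ∧ pvPrimeB i then acc.2 + 1 else acc.2],
                 if 2 ≤ i ∧ pvPrimeB i then acc.2 + 1 else acc.2)) ([0, 0], 0)).2) := by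
        rw [hcnt]
        by_cases hp : Nat.Prime (2 + c)
        · have hpb : pvPrimeB (2 + c) = true := by simp [pvPrimeB, hp]
          have hf : pvArrRead st.1 (2 + c) = false := by
            rw [Bool.eq_false_iff]
            exact fun h => (hcur.1 h) hp
          rw [hf]
          simp [hpb, h22c]
        · have hpb : pvPrimeB (2 + c) = false := by simp [pvPrimeB, hp]
          rw [hcur.2 hp]
          simp [hpb]
      refine ⟨?_, ?_, ?_, ?_, ?_⟩
      · rw [pv_inner_size]
        exact hsz
      · intro m
        rw [pv_inner_read L (2 + c) _ st.1 hsz m, Bool.or_eq_true, hread m,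
          decide_eq_true_eq, hplist']
        have htk := pv_taken_eq L (2 + c) (by omega) ((List.range' 2 (c + 1)).filter pvPrimeB)
          (by rw [show 2 + c - 1 = c + 1 by omega])
        constructor
        · rintro (⟨i, h2, hle, rest⟩ | hnew)
          · exact ⟨i, h2, by omega, rest⟩
          · obtain ⟨p, hptk, rfl⟩ := List.mem_map.1 hnew
            obtain ⟨hpp, hple, hmul⟩ := (htk p).1 hptk
            exact ⟨2 + c, by omega, by omega, p, hpp, hple, rfl, hmul⟩
        · rintro ⟨i, h2, hle, p, hp, hpm, heq, hmL⟩
          rcases Nat.lt_or_ge i (2 + c) with hlt | hge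
          · exact Or.inl ⟨i, h2, by omega, p, hp, hpm, heq, hmL⟩
          · have : i = 2 + c := by omega
            subst this
            exact Or.inr (List.mem_map.2 ⟨p, (htk p).2 ⟨hp, hpm, by omega⟩, heq⟩)
      · rw [List.filter_append]
        exact hplist
      · rw [hpi, hcnt]
        rw [hcnt] at hcntstep
        rw [hcntstep]
      · rw [hcnt]
        rw [hcnt] at hcntstep
        rw [hcntstep]

-- ===== VERDICT (by name: the statement is the Claim_ definition above) =====
theorem sieve_with_pi_py_spec : Claim_equal_sieve_with_pi_py := by
  intro limit _
  unfold Spec_sieve_with_pi_py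
  by_cases hlt : limit < 2
  · simp only [sieve_with_pi_py, sieve_with_pi_py_alt, if_pos hlt]
  · simp only [sieve_with_pi_py, sieve_with_pi_py_alt, if_neg hlt]
    set L := limit.toNat with hLdef
    have hL : 2 ≤ L := by omega
    have hmemrange : ∀ i ∈ List.range' 2 (L + 1 - 2), 2 ≤ i ∧ i ≤ L := by
      intro i hi
      rw [List.mem_range'] at hi
      obtain ⟨j, hj, rfl⟩ := hi
      omega
    have hgg : ∀ i ∈ List.range' 2 (L + 1 - 2),
        pvArrRead (pvMarkLoop L
          (((Array.replicate (L + 1) true).setIfInBounds 0 false).setIfInBounds 1 false)) i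
          = pvPrimeB i := by
      intro i hi
      obtain ⟨h2, hle⟩ := hmemrange i hi
      rw [Bool.eq_iff_iff, pv_markLoop_prime L hL i hle]
      simp [pvPrimeB]
    obtain ⟨-, -, hpr, hpi, -⟩ := pv_euler_inv L hL (L + 1 - 2) (by omega)
    rw [hpr, hpi]
    -- A's primes list equals B's primes list
    rw [List.filter_congr hgg]
    -- A's pi fold: peel off indices 0 and 1, then switch the predicate to pvPrimeB
    have hrange : List.range (L + 1) = 0 :: 1 :: List.range' 2 (L + 1 - 2) := by
      rw [List.range_eq_range']
      have h1 : L + 1 = (L + 1 - 2) + 1 + 1 := by omega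
      rw [h1, List.range'_succ, List.range'_succ]
      norm_num
      omega
    rw [hrange, pv_fold01 (pvArrRead (pvMarkLoop L (((Array.replicate (L + 1) true).setIfInBounds 0 false).setIfInBounds 1 false))),
      pv_foldA_congr _ _ (List.range' 2 (L + 1 - 2)) ([0, 0], 0) hgg]
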